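-- pv_equiv track=rewrite | github.com/jxwillin/AdventOfCode | utils/util_arrays.py | group_by_blanks
-- ===== SOURCE A (Python) =====
-- def group_by_blanks(data):
--     results = [[]]
--     for x in data:
--         if x  != "":
--             results[-1].append(x)
--         else:
--             results.append([])
--     return results
-- ===== SOURCE B (Python) =====
-- def group_by_blanks(data):
--     data = list(data)
--     if "" not in data:
--         return [data]
--     i = data.index("")
--     return [data[:i]] + group_by_blanks(data[i+1:])
-- ===== Notes on version B (the rewrite author's own statement) =====
-- stated objective: alternative
-- what changed: Replaces A's single append-to-last-group loop with a recursive divide at the first blank: find the first "" with index, emit the prefix slice as a group, and recurse on the suffix after it.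
import Mathlib
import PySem

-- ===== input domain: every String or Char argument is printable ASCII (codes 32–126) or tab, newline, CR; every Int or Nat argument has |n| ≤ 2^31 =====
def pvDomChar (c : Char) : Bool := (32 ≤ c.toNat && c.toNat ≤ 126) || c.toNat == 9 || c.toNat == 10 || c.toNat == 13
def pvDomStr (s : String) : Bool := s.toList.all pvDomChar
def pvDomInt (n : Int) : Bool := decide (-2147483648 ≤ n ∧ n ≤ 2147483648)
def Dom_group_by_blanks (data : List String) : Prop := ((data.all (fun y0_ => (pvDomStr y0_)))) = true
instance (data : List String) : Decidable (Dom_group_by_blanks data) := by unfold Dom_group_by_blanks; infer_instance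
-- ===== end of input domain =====

-- B splits at the first blank recursively (index + slices) instead of A's append-to-last-group loop; alternative decomposition, same cost.

-- ===== PORT A =====
-- A's loop state `results` is always nonempty (it starts as [[]] and only grows),
-- so `results[-1].append(x)` is exactly "replace the last group by itself ++ [x]".
def stepA (results : List (List String)) (x : String) : List (List String) :=
  if x ≠ "" then results.dropLast ++ [((results.getLast?).getD []) ++ [x]]
  else results ++ [[]]

def group_by_blanks (data : List String) : List (List String) :=
  data.foldl stepA [[]]

-- ===== PORT B =====
-- termination helper: the sliced suffix after the first blank is strictly shorter
theorem pvSliceLt (data : List String) (i : Nat)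
    (h : PySem.List.index? data "" = some i) :
    (PySem.List.slice data (some ((i : Int) + 1)) none).length < data.length := by
  obtain ⟨hk, -, -⟩ := PySem.List.getElem_of_index?_eq_some h
  have : ((i : Int) + 1) = ((i + 1 : Nat) : Int) := by push_cast; ring
  rw [this, PySem.List.slice_from_natCast, List.length_drop]
  omega

def group_by_blanks_alt (data : List String) : List (List String) :=
  match h : PySem.List.index? data "" with
  | none => [data]
  | some i =>
      PySem.List.slice data (some 0) (some (i : Int))
        :: group_by_blanks_alt (PySem.List.slice data (some ((i : Int) + 1)) none)
termination_by data.length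
decreasing_by exact pvSliceLt data i h

-- ===== PRECONDITION & SPEC =====
def Spec_group_by_blanks (data : List String) (out : List (List String)) : Prop := out = group_by_blanks_alt data
instance (data : List String) (out : List (List String)) : Decidable (Spec_group_by_blanks data out) := by unfold Spec_group_by_blanks; infer_instance

-- ===== CLAIM (what is proved, stated in full; the proofs are below) =====
def Claim_equal_group_by_blanks : Prop := ∀ (data : List String), Dom_group_by_blanks data → Spec_group_by_blanks data (group_by_blanks data)

-- ===== LEMMAS AND PROOFS =====

theorem stepA_ne_nil (rs : List (List String)) (x : String) (_h : rs ≠ []) :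
    stepA rs x ≠ [] := by
  unfold stepA; split <;> simp

theorem stepA_append (acc rs : List (List String)) (x : String) (h : rs ≠ []) :
    stepA (acc ++ rs) x = acc ++ stepA rs x := by
  unfold stepA
  split
  · rw [List.dropLast_append_of_ne_nil h, List.getLast?_append_of_ne_nil _ h]
    simp
  · simp

theorem foldl_stepA_shift (rest : List String) :
    ∀ (acc rs : List (List String)), rs ≠ [] →
      List.foldl stepA (acc ++ rs) rest = acc ++ List.foldl stepA rs rest := by
  induction rest with
  | nil => intro acc rs h; simp
  | cons x xs ih =>
      intro acc rs h
      simp only [List.foldl_cons, stepA_append acc rs x h]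
      exact ih acc (stepA rs x) (stepA_ne_nil rs x h)

theorem foldl_stepA_noblank (pre : List String) :
    ∀ (g : List String), "" ∉ pre →
      List.foldl stepA [g] pre = [g ++ pre] := by
  induction pre with
  | nil => intro g _; simp
  | cons x xs ih =>
      intro g h
      have hx : x ≠ "" := by simp at h; exact h.1
      have hxs : "" ∉ xs := by simp at h; exact fun m => h.2 (by exact m)
      simp only [List.foldl_cons]
      have : stepA [g] x = [g ++ [x]] := by
        unfold stepA; simp [hx]
      rw [this, ih (g ++ [x]) hxs]
      simp

theorem group_by_blanks_eq (n : Nat) :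
    ∀ (data : List String), data.length ≤ n →
      group_by_blanks data = group_by_blanks_alt data := by
  induction n with
  | zero =>
      intro data hlen
      have hnil : data = [] := by cases data <;> simp_all
      subst hnil
      unfold group_by_blanks_alt
      split
      · simp [group_by_blanks]
      · rename_i i heq
        obtain ⟨pre, suf, hdata, -, -⟩ :=
          (PySem.List.index?_eq_some_iff [] "" i).mp heq
        simp at hdata
  | succ n ih =>
      intro data hlen
      unfold group_by_blanks_alt
      split
      · rename_i heq
        have hnot : "" ∉ data := (PySem.List.index?_eq_none_iff data "").mp heq
        simp only [group_by_blanks]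
        simpa using foldl_stepA_noblank data [] hnot
      · rename_i i heq
        obtain ⟨pre, suf, hdata, hlenpre, hpre⟩ :=
          (PySem.List.index?_eq_some_iff data "" i).mp heq
        have hA : group_by_blanks data = pre :: group_by_blanks suf := by
          simp only [group_by_blanks]
          rw [hdata, List.foldl_append]
          have h1 : List.foldl stepA [[]] pre = [pre] := by
            simpa using foldl_stepA_noblank pre [] hpre
          rw [h1]
          simp only [List.foldl_cons]
          have h2 : stepA [pre] "" = [pre] ++ [[]] := by
            unfold stepA; simp
          rw [h2, foldl_stepA_shift suf [pre] [[]] (by simp)]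
          rfl
        have hslice1 : PySem.List.slice data (some 0) (some (i : Int)) = pre := by
          rw [show ((0 : Int)) = ((0 : Nat) : Int) from rfl, PySem.List.slice_natCast]
          subst hdata hlenpre
          simp
        have hslice2 :
            PySem.List.slice data (some ((i : Int) + 1)) none = suf := by
          rw [show ((i : Int) + 1) = ((i + 1 : Nat) : Int) by push_cast; ring,
            PySem.List.slice_from_natCast]
          subst hdata hlenpre
          simp
        have hsuflt : suf.length ≤ n := by
          have : data.length = pre.length + 1 + suf.length := by
            subst hdata; simp; omega
          omega
        rw [hA, hslice1, hslice2, ih suf hsuflt]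

-- ===== VERDICT (by name: the statement is the Claim_ definition above) =====
theorem group_by_blanks_spec : Claim_equal_group_by_blanks := by
  intro data _
  unfold Spec_group_by_blanks
  exact group_by_blanks_eq data.length data le_rfl
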